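-- pv_equiv track=rewrite | github.com/DanElH0mbre/aoc-21 | d15/sol.py | transform_cave
-- ===== SOURCE A (Python) =====
-- def transform_cave(cave):
--     height = len(cave)
--     width = len(cave[0])
--     newcave = [[0 for j in range(5*width)] for i in range(5*height)]
--     for i in range(5*height):
--         for j in range(5*width):
--             sourcex = j % width
--             sourcey = i % height
--             temp_risk = cave[sourcex][sourcey] + i // height + j // width
--             risk = 1 + temp_risk % 10 if temp_risk > 9 else temp_risk
--             newcave[i][j] = risk
--     return newcave
-- ===== SOURCE B (Python) =====
-- def transform_cave(cave):
--     height = len(cave)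
--     width = len(cave[0])
--     # The block at tile offsets (ti, tj) depends only on s = ti + tj, so only
--     # 9 shifted tiles exist; compute each once (with A's swapped cave[j][i]
--     # indexing and exact wrap formula), then assemble the 5x5 block matrix by
--     # concatenating precomputed rows.
--     tiles = []
--     for s in range(9):
--         tile = []
--         for i in range(height):
--             row = []
--             for j in range(width):
--                 t = cave[j][i] + s
--                 row.append(1 + t % 10 if t > 9 else t)
--             tile.append(row)
--         tiles.append(tile)
--     out = []
--     for ti in range(5):
--         for i in range(height):
--             row = []
--             for tj in range(5):
--                 row.extend(tiles[ti + tj][i])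
--             out.append(row)
--     return out
-- ===== Notes on version B (the rewrite author's own statement) =====
-- stated objective: faster
-- what changed: B exploits that the (ti,tj) block depends only on ti+tj: it precomputes the 9 shifted tiles once and assembles the output by concatenating those precomputed rows, instead of A's per-cell modulo/floor-division evaluation over the whole 5h x 5w grid.
import Mathlib
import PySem

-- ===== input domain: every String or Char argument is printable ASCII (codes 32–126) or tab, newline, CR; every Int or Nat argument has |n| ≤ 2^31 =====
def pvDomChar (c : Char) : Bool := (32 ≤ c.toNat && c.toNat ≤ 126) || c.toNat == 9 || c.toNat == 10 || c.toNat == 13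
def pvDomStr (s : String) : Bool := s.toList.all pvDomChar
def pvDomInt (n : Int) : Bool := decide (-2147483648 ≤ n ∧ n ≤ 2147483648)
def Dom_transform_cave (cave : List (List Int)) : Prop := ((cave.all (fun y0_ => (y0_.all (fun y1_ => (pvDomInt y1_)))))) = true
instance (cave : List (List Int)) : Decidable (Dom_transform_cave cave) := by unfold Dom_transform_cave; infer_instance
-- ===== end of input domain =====

-- B precomputes the 9 shifted tiles (the (ti,tj) block depends only on ti+tj) and
-- assembles the output by concatenating their rows, instead of A's per-cell div/mod
-- evaluation over the whole 5h x 5w grid.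

-- ===== PORT A =====
-- Literal port of A. range(n) over a nonnegative bound is List.range; the loop indices
-- i, j are nonnegative, so Nat % and / coincide with Python's % and // here (and
-- Int % 10 on the risk matches Python's % for the positive divisor 10). Python's
-- cave[sourcex][sourcey] raises IndexError when out of range; the port uses getD,
-- and Pre_transform_cave admits exactly the inputs where every access is in range.
def transform_cave (cave : List (List Int)) : List (List Int) :=
  let height := cave.length
  let width := (cave.headD []).length
  let newcave := (List.range (5*height)).map (fun _ => (List.range (5*width)).map (fun _ => (0:Int)))
  (List.range (5*height)).foldl (fun nc i =>
    (List.range (5*width)).foldl (fun nc j =>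
      let sourcex := j % width
      let sourcey := i % height
      let temp_risk := (cave.getD sourcex []).getD sourcey 0 + ((i / height : Nat) : Int) + ((j / width : Nat) : Int)
      let risk := if temp_risk > 9 then 1 + temp_risk % 10 else temp_risk
      nc.set i ((nc.getD i []).set j risk)) nc) newcave

-- ===== PORT B =====
-- Literal port of B: the 9 shifted tiles are built first (tiles[s][i][j] uses A's
-- swapped access cave[j][i] and the exact wrap formula), then each output row is the
-- concatenation of the rows tiles[ti+tj][i] for tj in range(5) (Python's extend loop).
def transform_cave_alt (cave : List (List Int)) : List (List Int) :=
  let height := cave.length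
  let width := (cave.headD []).length
  let tiles := (List.range 9).map (fun s =>
    (List.range height).map (fun i =>
      (List.range width).map (fun j =>
        let t := (cave.getD j []).getD i 0 + ((s : Nat) : Int)
        if t > 9 then 1 + t % 10 else t)))
  ((List.range 5).map (fun ti =>
    (List.range height).map (fun i =>
      ((List.range 5).map (fun tj =>
        ((tiles.getD (ti+tj) []).getD i []))).flatten))).flatten

-- ===== PRECONDITION & SPEC =====
-- Pre_ excludes exactly the inputs on which Python A raises IndexError: the empty cave
-- (cave[0]) and caves where the swapped access cave[j][i] (j < width, i < height) goes
-- out of range; A returns on every other input, and B raises on exactly the same inputs.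
def Pre_transform_cave (cave : List (List Int)) : Prop :=
  cave ≠ [] ∧ (cave.headD []).length ≤ cave.length ∧
    ∀ row ∈ cave.take (cave.headD []).length, cave.length ≤ row.length
instance (cave : List (List Int)) : Decidable (Pre_transform_cave cave) := by unfold Pre_transform_cave; infer_instance
def pvWitness_transform_cave : List (List Int) := [[1, 2], [8, 9]]
def Spec_transform_cave (cave : List (List Int)) (out : List (List Int)) : Prop := out = transform_cave_alt cave
instance (cave : List (List Int)) (out : List (List Int)) : Decidable (Spec_transform_cave cave out) := by unfold Spec_transform_cave; infer_instance

-- ===== CLAIM (what is proved, stated in full; the proofs are below) =====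
def Claim_equal_transform_cave : Prop := ∀ (cave : List (List Int)), Dom_transform_cave cave → Pre_transform_cave cave → Spec_transform_cave cave (transform_cave cave)

-- ===== LEMMAS AND PROOFS =====

-- the common value of both grids at global position (k, l)
def pvCell (cave : List (List Int)) (H W k l : Nat) : Int :=
  if (cave.getD (l % W) []).getD (k % H) 0 + ((k / H : Nat) : Int) + ((l / W : Nat) : Int) > 9
  then 1 + ((cave.getD (l % W) []).getD (k % H) 0 + ((k / H : Nat) : Int) + ((l / W : Nat) : Int)) % 10
  else (cave.getD (l % W) []).getD (k % H) 0 + ((k / H : Nat) : Int) + ((l / W : Nat) : Int)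

-- folding a per-index overwrite over range n rewrites the first n entries
theorem pv_foldl_set_prefix {α : Type} (g : Nat → α) :
    ∀ (n : Nat) (l : List α), n ≤ l.length →
      (List.range n).foldl (fun r j => r.set j (g j)) l = (List.range n).map g ++ l.drop n := by
  intro n
  induction n with
  | zero => intro l _; simp
  | succ n ih =>
    intro l hn
    rw [List.range_succ, List.foldl_append, ih l (by omega)]
    simp only [List.foldl_cons, List.foldl_nil]
    rw [List.set_append]
    simp
    rw [List.drop_eq_getElem_cons (show n < l.length by omega)]
    rfl

-- the inner loop of A only touches row i
theorem pv_inner_factor (g : Nat → Int) :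
    ∀ (m : Nat) (nc : List (List Int)) (i : Nat),
      (List.range m).foldl (fun nc j => nc.set i ((nc.getD i []).set j (g j))) nc
      = nc.set i ((List.range m).foldl (fun r j => r.set j (g j)) (nc.getD i [])) := by
  intro m
  induction m with
  | zero =>
    intro nc i
    by_cases h : i < nc.length
    · simp [List.getD, List.getElem?_eq_getElem h]
    · rw [List.set_eq_of_length_le (by omega)]; rfl
  | succ m ih =>
    intro nc i
    rw [List.range_succ, List.foldl_append, ih, List.foldl_append]
    simp only [List.foldl_cons, List.foldl_nil, List.set_set]
    by_cases h : i < nc.length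
    · congr 1
      simp [List.getD, h]
    · rw [List.set_eq_of_length_le (by omega), List.set_eq_of_length_le (by omega)]

-- the outer loop of A rewrites the first n rows, each to its fully overwritten form
theorem pv_outer_spec (G : Nat → Nat → Int) (W : Nat) :
    ∀ (n : Nat) (nc : List (List Int)), n ≤ nc.length → (∀ r ∈ nc, r.length = W) →
      (List.range n).foldl
        (fun nc i => nc.set i ((List.range W).foldl (fun r j => r.set j (G i j)) (nc.getD i []))) nc
      = (List.range n).map (fun i => (List.range W).map (G i)) ++ nc.drop n := by
  intro n
  induction n with
  | zero => intro nc _ _; simp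
  | succ n ih =>
    intro nc hn hW
    rw [List.range_succ, List.foldl_append, ih nc (by omega) hW]
    simp only [List.foldl_cons, List.foldl_nil]
    rw [List.drop_eq_getElem_cons (show n < nc.length by omega)]
    have hxW : nc[n].length = W := hW nc[n] (List.getElem_mem _)
    generalize hx : nc[n] = x
    rw [hx] at hxW
    have hget : ((List.range n).map (fun i => (List.range W).map (G i)) ++ x :: nc.drop (n+1)).getD n []
        = x := by
      rw [List.getD_append_right _ _ _ _ (by simp)]
      simp
    rw [hget, pv_foldl_set_prefix (G n) W x hxW.ge, List.set_append]
    simp [List.drop_eq_nil_of_le hxW.le]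

-- a flattened a×n tiling read in order is the range (a*n) map of the (div, mod) reading
theorem pv_tiled_eq {α : Type} (e : Nat → Nat → α) (a n : Nat) :
    ((List.range a).map (fun t => (List.range n).map (fun i => e t i))).flatten
    = (List.range (a*n)).map (fun k => e (k/n) (k%n)) := by
  cases n with
  | zero => simp
  | succ n' =>
    induction a with
    | zero => simp
    | succ a iha =>
      have h1 : List.range (a+1) = List.range a ++ [a] := List.range_succ
      have h2 : (a+1) * (n'+1) = a*(n'+1) + (n'+1) := by ring
      rw [h1, List.map_append, List.flatten_append, iha, h2, show List.range (a*(n'+1) + (n'+1)) = List.range (a*(n'+1)) ++ (List.range (n'+1)).map (fun x => a*(n'+1) + x) from List.range_add, List.map_append]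
      congr 1
      simp only [List.map_cons, List.map_nil, List.flatten_cons, List.flatten_nil,
        List.append_nil, List.map_map]
      apply List.map_congr_left
      intro i hi
      rw [List.mem_range] at hi
      have hdiv : (a*(n'+1)+i)/(n'+1) = a := by
        rw [Nat.mul_comm, Nat.mul_add_div (by omega), Nat.div_eq_of_lt hi]
        rfl
      have hmod : (a*(n'+1)+i)%(n'+1) = i := by
        rw [Nat.mul_add_mod']; exact Nat.mod_eq_of_lt hi
      simp [Function.comp, hdiv, hmod]

theorem pv_A_canon (cave : List (List Int)) :
    transform_cave cave
    = (List.range (5*cave.length)).map (fun k =>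
        (List.range (5*(cave.headD []).length)).map (fun l =>
          pvCell cave cave.length (cave.headD []).length k l)) := by
  unfold transform_cave
  simp only []
  have hf : (fun (nc : List (List Int)) (i : Nat) =>
      (List.range (5*(cave.headD []).length)).foldl (fun nc j =>
        nc.set i ((nc.getD i []).set j
          (if (cave.getD (j % (cave.headD []).length) []).getD (i % cave.length) 0
                + ((i / cave.length : Nat) : Int) + ((j / (cave.headD []).length : Nat) : Int) > 9
           then 1 + ((cave.getD (j % (cave.headD []).length) []).getD (i % cave.length) 0
                + ((i / cave.length : Nat) : Int) + ((j / (cave.headD []).length : Nat) : Int)) % 10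
           else (cave.getD (j % (cave.headD []).length) []).getD (i % cave.length) 0
                + ((i / cave.length : Nat) : Int) + ((j / (cave.headD []).length : Nat) : Int)))) nc)
    = (fun nc i => nc.set i ((List.range (5*(cave.headD []).length)).foldl
        (fun r j => r.set j (pvCell cave cave.length (cave.headD []).length i j)) (nc.getD i []))) := by
    funext nc i
    exact pv_inner_factor (pvCell cave cave.length (cave.headD []).length i) _ nc i
  rw [hf, pv_outer_spec (pvCell cave cave.length (cave.headD []).length)
      (5*(cave.headD []).length) (5*cave.length) _ (by simp)
      (by intro r hr; rw [List.mem_map] at hr; obtain ⟨x, -, hx⟩ := hr; simp [← hx])]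
  simp

theorem pv_B_canon (cave : List (List Int)) :
    transform_cave_alt cave
    = (List.range (5*cave.length)).map (fun k =>
        (List.range (5*(cave.headD []).length)).map (fun l =>
          pvCell cave cave.length (cave.headD []).length k l)) := by
  unfold transform_cave_alt
  simp only []
  rw [pv_tiled_eq]
  apply List.map_congr_left
  intro k hk
  rw [List.mem_range] at hk
  have hH0 : 0 < cave.length := by omega
  have hkH : k % cave.length < cave.length := Nat.mod_lt _ hH0
  have hti : k / cave.length < 5 := Nat.div_lt_of_lt_mul (by omega)
  -- resolve tiles.getD (ti+tj) [] and its row i, then tile the inner row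
  have hrow : ∀ tj ∈ List.range 5,
      ((((List.range 9).map (fun s =>
        (List.range cave.length).map (fun i =>
          (List.range (cave.headD []).length).map (fun j =>
            let t := (cave.getD j []).getD i 0 + ((s : Nat) : Int)
            if t > 9 then 1 + t % 10 else t)))).getD (k / cave.length + tj) []).getD (k % cave.length) [])
      = (List.range (cave.headD []).length).map (fun j =>
          let t := (cave.getD j []).getD (k % cave.length) 0 + ((k / cave.length + tj : Nat) : Int)
          if t > 9 then 1 + t % 10 else t) := by
    intro tj htj
    rw [List.mem_range] at htj
    have hs : k / cave.length + tj < 9 := by omega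
    rw [show ∀ (F : Nat → List (List Int)), (((List.range 9).map F).getD (k / cave.length + tj) []) = F (k / cave.length + tj) from by
      intro F; rw [List.getD_eq_getElem _ _ (by simpa using hs)]; simp]
    rw [List.getD_eq_getElem _ _ (by simpa using hkH)]
    simp
  rw [List.map_congr_left hrow, pv_tiled_eq]
  apply List.map_congr_left
  intro l hl
  rw [List.mem_range] at hl
  have hW0 : 0 < (cave.headD []).length := by omega
  have hlW : l % (cave.headD []).length < (cave.headD []).length := Nat.mod_lt _ hW0
  simp only [pvCell]
  have hcast : ((k / cave.length + l / (cave.headD []).length : Nat) : Int)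
      = ((k / cave.length : Nat) : Int) + ((l / (cave.headD []).length : Nat) : Int) := by push_cast; ring
  rw [hcast]
  ring_nf

-- ===== VERDICT (by name: the statement is the Claim_ definition above) =====
theorem transform_cave_spec : Claim_equal_transform_cave := by
  intro cave _ _
  unfold Spec_transform_cave
  rw [pv_A_canon, pv_B_canon]
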